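-- pv_equiv track=rewrite | github.com/Nikikapralov/Python | Advanced/6. File Handling Exercises/02-Line_numbers.py | get_the_count
-- ===== SOURCE A (Python) =====
-- def get_the_count(line):
--     to_count = ["-", ",", ".", "!", "?", "'", ':', ';']
--     letters = 0
--     marks = 0
--     for item in line:
--         if item.isalpha():
--             letters += 1
--         elif item in to_count:
--             marks += 1
--     return letters, marks
-- ===== SOURCE B (Python) =====
-- def get_the_count(line):
--     # Build a frequency table once, then aggregate it in two separate passes.
--     counts = {}
--     for ch in line:
--         counts[ch] = counts.get(ch, 0) + 1
--     letters = sum(c for ch, c in counts.items() if ch.isalpha())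
--     to_count = ["-", ",", ".", "!", "?", "'", ':', ';']
--     marks = sum(counts.get(m, 0) for m in to_count)
--     return letters, marks
-- ===== Notes on version B (the rewrite author's own statement) =====
-- stated objective: alternative
-- what changed: B replaces A's single character-by-character branching loop with a frequency table (dict counter) built in one pass, then computes letters by summing counts of distinct alphabetic keys and marks by summing table lookups over the fixed punctuation list.
import Mathlib
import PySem

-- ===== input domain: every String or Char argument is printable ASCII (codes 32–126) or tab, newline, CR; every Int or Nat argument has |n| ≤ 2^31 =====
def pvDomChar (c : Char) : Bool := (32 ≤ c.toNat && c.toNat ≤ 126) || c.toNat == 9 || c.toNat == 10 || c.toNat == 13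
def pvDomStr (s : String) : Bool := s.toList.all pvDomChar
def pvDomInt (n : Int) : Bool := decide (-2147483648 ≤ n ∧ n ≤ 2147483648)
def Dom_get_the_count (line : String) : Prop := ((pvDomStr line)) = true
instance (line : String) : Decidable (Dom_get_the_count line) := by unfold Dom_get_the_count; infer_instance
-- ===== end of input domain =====

-- B builds a character frequency table in one pass, then aggregates letters over its distinct
-- alphabetic keys and marks via table lookups of the fixed punctuation list (alternative decomposition, same cost).


-- ===== PORT A =====
-- one loop over the characters; 'item in to_count' on the 1-char strings is ported as Char membership
def get_the_count (line : String) : Int × Int :=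
  let to_count : List Char := ['-', ',', '.', '!', '?', '\'', ':', ';']
  let s := line.toList.foldl (fun (s : Int × Int) item =>
    if PySem.Chars.isalpha item then (s.1 + 1, s.2)
    else if to_count.contains item then (s.1, s.2 + 1)
    else s) (0, 0)
  (s.1, s.2)

-- ===== PORT B =====
def get_the_count_alt (line : String) : Int × Int :=
  let counts : PySem.Dict Char Int :=
    line.toList.foldl (fun d ch => d.insert ch (d.getD ch 0 + 1)) PySem.Dict.empty
  let letters : Int :=
    ((counts.items.filter (fun kv => PySem.Chars.isalpha kv.1)).map (fun kv => kv.2)).sum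
  let to_count : List Char := ['-', ',', '.', '!', '?', '\'', ':', ';']
  let marks : Int := (to_count.map (fun m => counts.getD m 0)).sum
  (letters, marks)

-- ===== PRECONDITION & SPEC =====
def Spec_get_the_count (line : String) (out : Int × Int) : Prop := out = get_the_count_alt line
instance (line : String) (out : Int × Int) : Decidable (Spec_get_the_count line out) := by unfold Spec_get_the_count; infer_instance

-- ===== CLAIM (what is proved, stated in full; the proofs are below) =====
def Claim_equal_get_the_count : Prop := ∀ (line : String), Dom_get_the_count line → Spec_get_the_count line (get_the_count line)

-- ===== LEMMAS AND PROOFS =====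

-- the eight punctuation marks are not alphabetic
theorem pvTcNotAlpha : ∀ c ∈ (['-', ',', '.', '!', '?', '\'', ':', ';'] : List Char), PySem.Chars.isalpha c = false := by
  intro c hc; fin_cases hc <;> rfl

-- ∑ over a nodup key list of the multiplicities in xs counts the members of that list in xs
theorem pvSumCountEqCountP (tc : List Char) (h : tc.Nodup) (xs : List Char) :
    (tc.map (fun m => xs.count m)).sum = xs.countP (fun c => tc.contains c) := by
  induction xs with
  | nil => simp
  | cons x xs ih =>
    have hcnt : ∀ m : Char, (x :: xs).count m = xs.count m + (if m = x then 1 else 0) := by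
      intro m
      by_cases hm : m = x
      · simp [hm]
      · have hxm : ¬x = m := fun hh => hm hh.symm
        simp [hm, hxm]
    have hsum : (tc.map (fun m => (x :: xs).count m)).sum
        = (tc.map (fun m => xs.count m)).sum + (tc.map (fun m => if m = x then 1 else 0)).sum := by
      simp only [hcnt]
      induction tc with
      | nil => simp
      | cons t ts iht => simp at iht ⊢; omega
    have hind : ∀ (l : List Char), l.Nodup → (l.map (fun m => if m = x then 1 else 0)).sum = if x ∈ l then 1 else 0 := by
      intro l
      induction l with
      | nil => intro _; simp
      | cons t ts ih2 =>
        intro hl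
        rw [List.nodup_cons] at hl
        by_cases ht : t = x
        · subst ht
          simp [ih2 hl.2, hl.1]
        · have hx : ¬x = t := fun hh => ht hh.symm
          simp [ht, hx, ih2 hl.2]
    rw [hsum, hind tc h, ih, List.countP_cons]
    by_cases hx : x ∈ tc <;> simp [hx]

-- the letters aggregate of B's counter table is the alpha-count of the character list
theorem pvLettersEq (xs : List Char) :
    (((PySem.Dict.counter xs).items.filter (fun kv => PySem.Chars.isalpha kv.1)).map (fun kv => kv.2)).sum
      = (xs.countP PySem.Chars.isalpha : Int) := by
  rw [PySem.Dict.items_counter]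
  rw [List.filter_map, List.map_map]
  have hperm : (PySem.Set.ofList xs).Perm xs.dedup := by
    refine (List.perm_ext_iff_of_nodup (PySem.Set.nodup_ofList xs) xs.nodup_dedup).mpr ?_
    intro a; rw [PySem.Set.mem_ofList, List.mem_dedup]
  have hperm2 := ((hperm.filter (fun k => PySem.Chars.isalpha k)).map
    (fun k => ((k, (xs.count k : Int)) : Char × Int).2)).sum_eq
  simp only [Function.comp_def] at hperm2 ⊢
  rw [hperm2]
  have hc : ((xs.dedup.filter (fun k => PySem.Chars.isalpha k)).map (fun k => (xs.count k : Int))).sum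
      = (((xs.dedup.filter (fun k => PySem.Chars.isalpha k)).map (fun k => xs.count k)).sum : Int) := by
    induction xs.dedup.filter (fun k => PySem.Chars.isalpha k) with
    | nil => simp
    | cons y ys ih => simp [ih]
  rw [hc, List.sum_map_count_dedup_filter_eq_countP]

-- A's loop computes (countP isalpha, countP (∈ to_count)) — the branch classes are disjoint
theorem pvFoldEq (xs : List Char) :
    xs.foldl (fun (s : Int × Int) item =>
      if PySem.Chars.isalpha item then (s.1 + 1, s.2)
      else if (['-', ',', '.', '!', '?', '\'', ':', ';'] : List Char).contains item then (s.1, s.2 + 1)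
      else s) (0, 0)
    = ((xs.countP PySem.Chars.isalpha : Int),
       (xs.countP (fun c => (['-', ',', '.', '!', '?', '\'', ':', ';'] : List Char).contains c) : Int)) := by
  have hstep : xs.foldl (fun (s : Int × Int) item =>
      if PySem.Chars.isalpha item then (s.1 + 1, s.2)
      else if (['-', ',', '.', '!', '?', '\'', ':', ';'] : List Char).contains item then (s.1, s.2 + 1)
      else s) (0, 0)
    = xs.foldl (fun (s : Int × Int) item =>
      ((fun (a : Int) c => if PySem.Chars.isalpha c then a + 1 else a) s.1 item,
       (fun (a : Int) c => if (['-', ',', '.', '!', '?', '\'', ':', ';'] : List Char).contains c then a + 1 else a) s.2 item)) (0, 0) := by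
    apply PySem.List.foldl_congr_mem
    intro acc x _
    by_cases ha : PySem.Chars.isalpha x
    · have hb : (['-', ',', '.', '!', '?', '\'', ':', ';'] : List Char).contains x = false := by
        cases hcc : (['-', ',', '.', '!', '?', '\'', ':', ';'] : List Char).contains x with
        | false => rfl
        | true =>
          have hm : x ∈ (['-', ',', '.', '!', '?', '\'', ':', ';'] : List Char) := by
            simpa [List.contains_eq_mem] using hcc
          have hf := pvTcNotAlpha x hm
          rw [ha] at hf
          cases hf
      simp only [ha, hb, Bool.false_eq_true, reduceIte]
    · have ha' : PySem.Chars.isalpha x = false := by simpa using ha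
      cases hc : (['-', ',', '.', '!', '?', '\'', ':', ';'] : List Char).contains x <;>
        simp only [ha', hc, Bool.false_eq_true, reduceIte]
  rw [hstep,
    PySem.List.foldl_prod_mk (f := fun (a : Int) c => if PySem.Chars.isalpha c then a + 1 else a)
      (g := fun (a : Int) c => if (['-', ',', '.', '!', '?', '\'', ':', ';'] : List Char).contains c then a + 1 else a),
    PySem.List.foldl_if_add_one, PySem.List.foldl_if_add_one]
  simp only [zero_add]

-- cast of a Nat count-sum through Int
theorem pvCastSum (tc xs : List Char) :
    (tc.map (fun m => (xs.count m : Int))).sum = ((tc.map (fun m => xs.count m)).sum : Int) := by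
  induction tc with
  | nil => simp
  | cons y ys ih => simp [ih]

-- ===== VERDICT (by name: the statement is the Claim_ definition above) =====
theorem get_the_count_spec : Claim_equal_get_the_count := by
  intro line _
  show get_the_count line = get_the_count_alt line
  unfold get_the_count get_the_count_alt
  simp only [PySem.Dict.foldl_insert_getD_add_one_eq_counter]
  rw [pvFoldEq, pvLettersEq]
  simp only [PySem.Dict.getD_counter]
  rw [pvCastSum, pvSumCountEqCountP _ (by decide) line.toList]
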